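-- pv_equiv track=rewrite | github.com/AyushiBhandariBITS/Kaggle-competitions | Google Deepmind Code Golf/task240.py | f
-- ===== SOURCE A (Python) =====
-- from collections import Counter
--
-- def f(c,e):
--  if not c:return
--  H,W=len(c),len(c[0]);q=Counter(v for r in c for v in r if v);C=[v for v,k in q.items()if k>=8];o=[r[:]for r in c]
--  for v in C:
--   for R in(1,0):
--    M,S=(H,W)if not R else(W,H)
--    for i in range(M):
--     L=c[i]if R else[c[r][i]for r in range(H)];A=[j for j,x in enumerate(L)if x==v]
--     if len(A)<2:continue
--     if v==e:
--      if not any(x not in(0,e)for x in L):continue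
--     elif not any(x not in(0,e,v)for x in L):continue
--     for a,b in zip(A,A[1:]):
--      if(a,b)==(0,S-1)or any(L[j]for j in range(a+1,b)):continue
--      for j in range(a+1,b):
--       if R and not o[i][j]:o[i][j]=v
--       elif not R and not o[j][i]:o[j][i]=v
--  return o
-- ===== SOURCE B (Python) =====
-- def f(c, e):
--     if not c:
--         return None
--     H, W = len(c), len(c[0])
--     # one counting pass, keeping first-occurrence order
--     cnt, order = {}, []
--     for r in c:
--         for x in r:
--             if x:
--                 if x not in cnt:
--                     order.append(x)
--                     cnt[x] = 1
--                 else: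
--                     cnt[x] += 1
--     C = [v for v in order if cnt[v] >= 8]
--     o = [r[:] for r in c]
--     if not C:
--         return o
--     cols = [[c[r][i] for r in range(H)] for i in range(W)]  # transpose once
--     for v in C:
--         for R in (1, 0):
--             lines = c if R else cols
--             M = H if R else W
--             S = W if R else H
--             for i in range(M):
--                 L = lines[i]
--                 if v == e:
--                     if all(x in (0, e) for x in L):
--                         continue
--                 elif all(x in (0, e, v) for x in L):
--                     continue
--                 # single sweep: last position of v, and whether the gap since it is all zeros
--                 last = None
--                 clean = False
--                 for j, x in enumerate(L):
--                     if x == v: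
--                         if last is not None and clean and not (last == 0 and j == S - 1):
--                             for t in range(last + 1, j):
--                                 if R:
--                                     if not o[i][t]:
--                                         o[i][t] = v
--                                 else:
--                                     if not o[t][i]:
--                                         o[t][i] = v
--                         last = j
--                         clean = True
--                     elif x:
--                         clean = False
--     return o
-- ===== Notes on version B (the rewrite author's own statement) =====
-- stated objective: alternative
-- what changed: B replaces A's per-color per-line three-scan scheme (collect index list, zip consecutive pairs, re-scan each gap for nonzeros) by a single stateful sweep per line (last position of the color + clean-gap flag) over a transpose computed once, and builds the frequency table with one explicit counting pass instead of Counter over a generator. (Pre_f excludes exactly the inputs where A raises IndexError from its swapped row/column bounds; B returns the gap-filled grid there).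
import Mathlib
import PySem

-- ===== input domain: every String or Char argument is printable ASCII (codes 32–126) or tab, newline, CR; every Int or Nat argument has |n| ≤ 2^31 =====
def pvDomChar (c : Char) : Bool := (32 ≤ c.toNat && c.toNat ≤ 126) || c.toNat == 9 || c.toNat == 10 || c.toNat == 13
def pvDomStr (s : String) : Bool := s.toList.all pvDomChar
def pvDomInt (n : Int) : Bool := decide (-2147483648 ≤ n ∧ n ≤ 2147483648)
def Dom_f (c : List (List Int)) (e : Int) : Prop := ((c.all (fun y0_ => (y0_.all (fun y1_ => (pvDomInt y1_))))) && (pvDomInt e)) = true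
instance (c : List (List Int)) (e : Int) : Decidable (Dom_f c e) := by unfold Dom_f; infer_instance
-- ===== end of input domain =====

-- B replaces A's positions-list/pair-zip/gap-rescan scheme by one stateful sweep per line over a
-- transpose computed once (same asymptotic cost; alternative decomposition). A mutates no argument
-- observably (it copies c); both ports are about the return value.

-- the write statement 'if R and not o[i][j]: o[i][j]=v / elif not R and not o[j][i]: o[j][i]=v'
-- of Python A; exact under Pre_f (all indices in range there)
def pvWriteA (R : Bool) (i v : Int) (o : List (List Int)) (j : Int) : List (List Int) :=
  if R then
    if PySem.List.pyGetD (PySem.List.pyGetD o i []) j 0 = 0 then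
      PySem.List.pySetD o i (PySem.List.pySetD (PySem.List.pyGetD o i []) j v)
    else o
  else
    if PySem.List.pyGetD (PySem.List.pyGetD o j []) i 0 = 0 then
      PySem.List.pySetD o j (PySem.List.pySetD (PySem.List.pyGetD o j []) i v)
    else o


-- ===== PORT A =====
-- literal transliteration of A; indexing via pyGetD/pySetD is exact under Pre_f (in range there;
-- where Python raises IndexError the input is excluded by Pre_f)
def f (c : List (List Int)) (e : Int) : Option (List (List Int)) :=
  if c = [] then none
  else
    let H : Int := c.length
    let W : Int := (c.headD []).length
    let q : PySem.Dict Int Int := PySem.Dict.counter (c.flatMap (fun r => r.filter (fun v => decide (v ≠ 0))))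
    let C : List Int := (q.items.filter (fun p => decide (8 ≤ p.2))).map Prod.fst
    let o : List (List Int) := c.map (fun r => r)
    some (C.foldl (fun o v =>
      [true, false].foldl (fun o R =>
        let M : Int := if R then W else H   -- A's own '(H,W) if not R else (W,H)'
        let S : Int := if R then H else W
        (PySem.List.pyRange 0 M 1).foldl (fun o i =>
          let L : List Int :=
            if R then PySem.List.pyGetD c i []
            else (PySem.List.pyRange 0 H 1).map (fun r => PySem.List.pyGetD (PySem.List.pyGetD c r []) i 0)
          let A : List Int := ((PySem.List.enumerate L).filter (fun p => decide (p.2 = v))).map Prod.fst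
          if A.length < 2 then o
          else if (if v = e then (L.any (fun x => !(x == 0 || x == e))) = false
                   else (L.any (fun x => !(x == 0 || x == e || x == v))) = false) then o
          else (A.zip A.tail).foldl (fun o ab =>
            if (ab.1 = 0 ∧ ab.2 = S - 1) ∨
               ((PySem.List.pyRange (ab.1 + 1) ab.2 1).any (fun j => !(PySem.List.pyGetD L j 0 == 0))) = true then o
            else (PySem.List.pyRange (ab.1 + 1) ab.2 1).foldl (fun o j => pvWriteA R i v o j) o) o) o) o) o)

-- the identical write statement as it appears in Python B
def pvWriteB (R : Bool) (i v : Int) (o : List (List Int)) (j : Int) : List (List Int) :=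
  if R then
    if PySem.List.pyGetD (PySem.List.pyGetD o i []) j 0 = 0 then
      PySem.List.pySetD o i (PySem.List.pySetD (PySem.List.pyGetD o i []) j v)
    else o
  else
    if PySem.List.pyGetD (PySem.List.pyGetD o j []) i 0 = 0 then
      PySem.List.pySetD o j (PySem.List.pySetD (PySem.List.pyGetD o j []) i v)
    else o


-- ===== PORT B =====
-- literal transliteration of Source B
def f_alt (c : List (List Int)) (e : Int) : Option (List (List Int)) :=
  match c with
  | [] => none
  | _ :: _ =>
    let H : Int := c.length
    let W : Int := (c.headD []).length
    let s : PySem.Dict Int Int × List Int := c.foldl (fun s r => r.foldl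
      (fun (s : PySem.Dict Int Int × List Int) x =>
        if x ≠ 0 then
          if s.1.contains x = false then (s.1.insert x 1, s.2 ++ [x])
          else (s.1.insert x (s.1.getD x 0 + 1), s.2)
        else s) s) (PySem.Dict.empty, [])
    let C : List Int := s.2.filter (fun v => decide (8 ≤ s.1.getD v 0))
    let o : List (List Int) := c.map (fun r => r)
    if C = [] then some o
    else
      let cols : List (List Int) := (PySem.List.pyRange 0 W 1).map (fun i =>
        (PySem.List.pyRange 0 H 1).map (fun r => PySem.List.pyGetD (PySem.List.pyGetD c r []) i 0))
      some (C.foldl (fun o v =>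
        [true, false].foldl (fun o R =>
          let lines : List (List Int) := if R then c else cols
          let M : Int := if R then H else W
          let S : Int := if R then W else H
          (PySem.List.pyRange 0 M 1).foldl (fun o i =>
            let L : List Int := PySem.List.pyGetD lines i []
            if (if v = e then (L.all (fun x => x == 0 || x == e)) = true
                else (L.all (fun x => x == 0 || x == e || x == v)) = true) then o
            else
              ((PySem.List.enumerate L).foldl
                (fun (st : List (List Int) × Option Int × Bool) p =>
                  if p.2 = v then
                    (match st.2.1 with
                     | some a =>
                       if st.2.2 = true ∧ ¬ (a = 0 ∧ p.1 = S - 1) then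
                         ((PySem.List.pyRange (a + 1) p.1 1).foldl (fun o t => pvWriteB R i v o t) st.1,
                          some p.1, true)
                       else (st.1, some p.1, true)
                     | none => (st.1, some p.1, true))
                  else if p.2 ≠ 0 then (st.1, st.2.1, false)
                  else st) (o, (none : Option Int), false)).1) o) o) o)

-- ===== PRECONDITION & SPEC =====
-- Pre_f excludes exactly the inputs on which the Python A raises IndexError: whenever some nonzero
-- value occurs at least 8 times, A's swapped row/column bounds index c[i] for i < W and c[r][i] for
-- i < H, so the grid must be square with every row at least that long; A returns on all other inputs.
def Pre_f (c : List (List Int)) (e : Int) : Prop :=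
  (∃ v ∈ c.flatten, v ≠ 0 ∧ 8 ≤ c.flatten.count v) →
    ((c.headD []).length = c.length ∧ ∀ r ∈ c, c.length ≤ r.length)
instance (c : List (List Int)) (e : Int) : Decidable (Pre_f c e) := by unfold Pre_f; infer_instance

def pvWitness_f : List (List Int) × Int := ([[1,1,1],[1,1,1],[1,1,0]], 0)

def Spec_f (c : List (List Int)) (e : Int) (out : Option (List (List Int))) : Prop := out = f_alt c e
instance (c : List (List Int)) (e : Int) (out : Option (List (List Int))) : Decidable (Spec_f c e out) := by unfold Spec_f; infer_instance

-- ===== CLAIM (what is proved, stated in full; the proofs are below) =====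
def Claim_equal_f : Prop := ∀ (c : List (List Int)) (e : Int), Dom_f c e → Pre_f c e → Spec_f c e (f c e)

-- ===== LEMMAS AND PROOFS =====


-- proof-side helpers: fill application, positions, gap test, pair-based fills (A's shape),
-- sweep-based fills (B's shape)
def pvFill (R : Bool) (i v : Int) (o : List (List Int)) (js : List Int) : List (List Int) :=
  js.foldl (fun o j => pvWriteB R i v o j) o

def pvPos (v : Int) : List Int → Int → List Int
  | [], _ => []
  | x :: t, j0 => (if x = v then [j0] else []) ++ pvPos v t (j0 + 1)

def pvGapAny (L : List Int) (a b : Int) : Bool :=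
  (PySem.List.pyRange (a + 1) b 1).any (fun j => !(PySem.List.pyGetD L j 0 == 0))

def pvPf (L : List Int) (S : Int) : List Int → List Int
  | [] => []
  | [_] => []
  | a :: b :: t =>
    (if (a = 0 ∧ b = S - 1) ∨ pvGapAny L a b = true then [] else PySem.List.pyRange (a + 1) b 1)
      ++ pvPf L S (b :: t)

def pvSf (v S : Int) : List Int → Int → Option Int → Bool → List Int
  | [], _, _, _ => []
  | x :: t, j0, last, clean =>
    if x = v then
      (match last with
       | some a => if clean = true ∧ ¬(a = 0 ∧ j0 = S - 1) then PySem.List.pyRange (a + 1) j0 1 else []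
       | none => []) ++ pvSf v S t (j0 + 1) (some j0) true
    else pvSf v S t (j0 + 1) last (if x = 0 then clean else false)

theorem pvFill_append (R : Bool) (i v : Int) (o : List (List Int)) (xs ys : List Int) :
    pvFill R i v o (xs ++ ys) = pvFill R i v (pvFill R i v o xs) ys := by
  simp [pvFill, List.foldl_append]

theorem pvPos_eq (v : Int) : ∀ (L : List Int) (j0 : Int),
    ((PySem.List.enumerate L j0).filter (fun p => decide (p.2 = v))).map Prod.fst = pvPos v L j0 := by
  intro L
  induction L with
  | nil => intro j0; simp [PySem.List.enumerate, pvPos]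
  | cons x t ih =>
    intro j0
    rw [PySem.List.enumerate_cons]
    by_cases hx : x = v
    · simp [hx, pvPos, ih]
    · simp [hx, pvPos, ih]

theorem pvWriteAB : pvWriteA = pvWriteB := rfl

theorem pvPairfold_eq (R : Bool) (i v S : Int) (L : List Int) : ∀ (P : List Int) (o : List (List Int)),
    (P.zip P.tail).foldl (fun o ab =>
      if (ab.1 = 0 ∧ ab.2 = S - 1) ∨
         ((PySem.List.pyRange (ab.1 + 1) ab.2 1).any (fun j => !(PySem.List.pyGetD L j 0 == 0))) = true then o
      else (PySem.List.pyRange (ab.1 + 1) ab.2 1).foldl (fun o j => pvWriteA R i v o j) o) o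
    = pvFill R i v o (pvPf L S P) := by
  simp only [pvWriteAB]
  intro P
  induction P with
  | nil => intro o; simp [pvPf, pvFill]
  | cons a P ih =>
    intro o
    match P with
    | [] => simp [pvPf, pvFill]
    | b :: t =>
      simp only [List.tail_cons] at ih
      rw [List.tail_cons, List.zip_cons_cons, List.foldl_cons, ih, pvPf]
      show pvFill R i v
          (if (a = 0 ∧ b = S - 1) ∨ pvGapAny L a b = true then o
           else List.foldl (fun o j => pvWriteB R i v o j) o (PySem.List.pyRange (a + 1) b 1))
          (pvPf L S (b :: t))
        = pvFill R i v o
          ((if (a = 0 ∧ b = S - 1) ∨ pvGapAny L a b = true then []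
            else PySem.List.pyRange (a + 1) b 1) ++ pvPf L S (b :: t))
      by_cases hc : (a = 0 ∧ b = S - 1) ∨ pvGapAny L a b = true
      · rw [if_pos hc, if_pos hc, List.nil_append]
      · rw [if_neg hc, if_neg hc, pvFill_append]
        rfl

def pvStep (R : Bool) (i v S : Int) :
    (List (List Int) × Option Int × Bool) → (Int × Int) → (List (List Int) × Option Int × Bool) :=
  fun (st : List (List Int) × Option Int × Bool) p =>
    if p.2 = v then
      (match st.2.1 with
       | some a =>
         if st.2.2 = true ∧ ¬ (a = 0 ∧ p.1 = S - 1) then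
           ((PySem.List.pyRange (a + 1) p.1 1).foldl (fun o t => pvWriteB R i v o t) st.1,
            some p.1, true)
         else (st.1, some p.1, true)
       | none => (st.1, some p.1, true))
    else if p.2 ≠ 0 then (st.1, st.2.1, false)
    else st

theorem pvStep_none (R : Bool) (i v S : Int) (o : List (List Int)) (clean : Bool) (j0 x : Int) :
    pvStep R i v S (o, none, clean) (j0, x)
      = if x = v then (o, some j0, true) else if x ≠ 0 then (o, none, false) else (o, none, clean) := rfl

theorem pvStep_some (R : Bool) (i v S : Int) (o : List (List Int)) (a : Int) (clean : Bool) (j0 x : Int) :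
    pvStep R i v S (o, some a, clean) (j0, x)
      = if x = v then
          (if clean = true ∧ ¬ (a = 0 ∧ j0 = S - 1) then
             ((PySem.List.pyRange (a + 1) j0 1).foldl (fun o t => pvWriteB R i v o t) o, some j0, true)
           else (o, some j0, true))
        else if x ≠ 0 then (o, some a, false) else (o, some a, clean) := rfl

theorem pvSweep_step (R : Bool) (i v S : Int) : ∀ (t : List Int) (j0 : Int) (o : List (List Int))
    (last : Option Int) (clean : Bool),
    ((PySem.List.enumerate t j0).foldl (pvStep R i v S) (o, last, clean)).1
    = pvFill R i v o (pvSf v S t j0 last clean) := by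
  intro t
  induction t with
  | nil => intro j0 o last clean; simp [PySem.List.enumerate, pvSf, pvFill]
  | cons x t ih =>
    intro j0 o last clean
    rw [PySem.List.enumerate_cons, List.foldl_cons]
    cases last with
    | none =>
      rw [pvStep_none]
      by_cases hx : x = v
      · rw [if_pos hx, ih]
        have : pvSf v S (x :: t) j0 none clean = pvSf v S t (j0 + 1) (some j0) true := by
          rw [pvSf, if_pos hx]; simp
        rw [this]
      · rw [if_neg hx]
        by_cases h0 : x ≠ 0
        · rw [if_pos h0, ih]
          have : pvSf v S (x :: t) j0 none clean = pvSf v S t (j0 + 1) none false := by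
            rw [pvSf, if_neg hx, if_neg (by simpa using h0)]
          rw [this]
        · rw [if_neg h0, ih]
          have : pvSf v S (x :: t) j0 none clean = pvSf v S t (j0 + 1) none clean := by
            rw [pvSf, if_neg hx, if_pos (by simpa using h0)]
          rw [this]
    | some a =>
      rw [pvStep_some]
      by_cases hx : x = v
      · rw [if_pos hx]
        by_cases hc : clean = true ∧ ¬ (a = 0 ∧ j0 = S - 1)
        · rw [if_pos hc, ih]
          have : pvSf v S (x :: t) j0 (some a) clean
              = PySem.List.pyRange (a + 1) j0 1 ++ pvSf v S t (j0 + 1) (some j0) true := by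
            rw [pvSf, if_pos hx]
            show (if clean = true ∧ ¬ (a = 0 ∧ j0 = S - 1) then PySem.List.pyRange (a + 1) j0 1
                  else []) ++ pvSf v S t (j0 + 1) (some j0) true = _
            rw [if_pos hc]
          rw [this, pvFill_append]
          rfl
        · rw [if_neg hc, ih]
          have : pvSf v S (x :: t) j0 (some a) clean = pvSf v S t (j0 + 1) (some j0) true := by
            rw [pvSf, if_pos hx]
            show (if clean = true ∧ ¬ (a = 0 ∧ j0 = S - 1) then PySem.List.pyRange (a + 1) j0 1
                  else []) ++ pvSf v S t (j0 + 1) (some j0) true = _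
            rw [if_neg hc, List.nil_append]
          rw [this]
      · rw [if_neg hx]
        by_cases h0 : x ≠ 0
        · rw [if_pos h0, ih]
          have : pvSf v S (x :: t) j0 (some a) clean = pvSf v S t (j0 + 1) (some a) false := by
            rw [pvSf, if_neg hx, if_neg (by simpa using h0)]
          rw [this]
        · rw [if_neg h0, ih]
          have : pvSf v S (x :: t) j0 (some a) clean = pvSf v S t (j0 + 1) (some a) clean := by
            rw [pvSf, if_neg hx, if_pos (by simpa using h0)]
          rw [this]

theorem pvSweep_eq (R : Bool) (i v S : Int) (t : List Int) (j0 : Int) (o : List (List Int))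
    (last : Option Int) (clean : Bool) :
    ((PySem.List.enumerate t j0).foldl
      (fun (st : List (List Int) × Option Int × Bool) p =>
        if p.2 = v then
          (match st.2.1 with
           | some a =>
             if st.2.2 = true ∧ ¬ (a = 0 ∧ p.1 = S - 1) then
               ((PySem.List.pyRange (a + 1) p.1 1).foldl (fun o t => pvWriteB R i v o t) st.1,
                some p.1, true)
             else (st.1, some p.1, true)
           | none => (st.1, some p.1, true))
        else if p.2 ≠ 0 then (st.1, st.2.1, false)
        else st) (o, last, clean)).1
    = pvFill R i v o (pvSf v S t j0 last clean) :=
  pvSweep_step R i v S t j0 o last clean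

theorem pvGap_false (L0 : List Int) (a b : Int)
    (h : ∀ k : Int, a < k → k < b → PySem.List.pyGetD L0 k 0 = 0) :
    pvGapAny L0 a b = false := by
  rw [pvGapAny, List.any_eq_false]
  intro k hk
  rw [PySem.List.mem_pyRange_one] at hk
  simp [h k (by omega) (by omega)]

theorem pvGap_true (L0 : List Int) (a b : Int)
    (h : ¬ ∀ k : Int, a < k → k < b → PySem.List.pyGetD L0 k 0 = 0) :
    pvGapAny L0 a b = true := by
  push Not at h
  obtain ⟨k, hk1, hk2, hknz⟩ := h
  rw [pvGapAny, List.any_eq_true]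
  exact ⟨k, PySem.List.mem_pyRange_one.mpr ⟨by omega, hk2⟩, by simp [hknz]⟩

theorem pvCore (v S : Int) (L0 : List Int) : ∀ (t : List Int) (j0 : Int), 0 ≤ j0 →
    L0.drop j0.toNat = t →
    (∀ clean, pvSf v S t j0 none clean = pvPf L0 S (pvPos v t j0)) ∧
    (∀ (a : Int) (clean : Bool), a < j0 →
      (clean = true ↔ ∀ k : Int, a < k → k < j0 → PySem.List.pyGetD L0 k 0 = 0) →
      pvSf v S t j0 (some a) clean = pvPf L0 S (a :: pvPos v t j0)) := by
  intro t
  induction t with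
  | nil =>
    intro j0 _ _
    constructor
    · intro clean; rw [pvSf, pvPos]; rfl
    · intro a clean _ _; rw [pvSf, pvPos]; rfl
  | cons x t ih =>
    intro j0 h0 hdrop
    have hx0 : PySem.List.pyGetD L0 j0 0 = x := by
      have h1 : L0[j0.toNat]? = some x := by
        have h2 := List.getElem?_drop (xs := L0) (i := j0.toNat) (j := 0)
        rw [hdrop] at h2
        simpa using h2.symm
      rw [PySem.List.pyGetD_of_nonneg _ _ h0, List.getD_eq_getElem?_getD, h1]
      rfl
    have hdrop' : L0.drop (j0 + 1).toNat = t := by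
      have hn : (j0 + 1).toNat = j0.toNat + 1 := by omega
      rw [hn, ← List.tail_drop, hdrop, List.tail_cons]
    obtain ⟨iha, ihb⟩ := ih (j0 + 1) (by omega) hdrop'
    constructor
    · intro clean
      by_cases hx : x = v
      · rw [pvSf, if_pos hx]
        show [] ++ pvSf v S t (j0 + 1) (some j0) true = _
        rw [List.nil_append, pvPos, if_pos hx, List.singleton_append]
        exact ihb j0 true (by omega) ⟨fun _ k hk1 hk2 => absurd hk2 (by omega), fun _ => rfl⟩
      · rw [pvSf, if_neg hx, pvPos, if_neg hx, List.nil_append]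
        exact iha _
    · intro a clean ha hcl
      by_cases hx : x = v
      · rw [pvSf, if_pos hx]
        show (if clean = true ∧ ¬ (a = 0 ∧ j0 = S - 1) then PySem.List.pyRange (a + 1) j0 1
              else []) ++ pvSf v S t (j0 + 1) (some j0) true = _
        rw [pvPos, if_pos hx, List.singleton_append, pvPf]
        rw [ihb j0 true (by omega) ⟨fun _ k hk1 hk2 => absurd hk2 (by omega), fun _ => rfl⟩]
        congr 1
        by_cases hclean : clean = true
        · by_cases hb : a = 0 ∧ j0 = S - 1
          · rw [if_neg (by tauto), if_pos (Or.inl hb)]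
          · rw [if_pos ⟨hclean, hb⟩, if_neg]
            rw [pvGap_false L0 a j0 (hcl.mp hclean)]
            simp [hb]
        · rw [if_neg (by tauto), if_pos (Or.inr (pvGap_true L0 a j0 (fun h => hclean (hcl.mpr h))))]
      · rw [pvSf, if_neg hx, pvPos, if_neg hx, List.nil_append]
        apply ihb a _ (by omega)
        by_cases h0x : x = 0
        · rw [if_pos h0x]
          constructor
          · intro hc k hk1 hk2
            by_cases hkj : k = j0
            · rw [hkj, hx0, h0x]
            · exact hcl.mp hc k hk1 (by omega)
          · intro h
            exact hcl.mpr (fun k hk1 hk2 => h k hk1 (by omega))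
        · rw [if_neg h0x]
          constructor
          · intro hc; exact absurd hc (by simp)
          · intro h
            exact absurd (h j0 ha (by omega)) (by rw [hx0]; exact h0x)

theorem pvSf_eq_pvPf (v S : Int) (L : List Int) :
    pvSf v S L 0 none false = pvPf L S (pvPos v L 0) := by
  exact (pvCore v S L L 0 le_rfl (by simp)).1 false

theorem pvPf_short (L : List Int) (S : Int) (P : List Int) (h : P.length < 2) :
    pvPf L S P = [] := by
  match P with
  | [] => rfl
  | [_] => rfl
  | _ :: _ :: _ => simp at h

theorem pvLine (R : Bool) (i v e S : Int) (L : List Int) (o : List (List Int)) :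
    (if (((PySem.List.enumerate L).filter (fun p => decide (p.2 = v))).map Prod.fst).length < 2 then o
     else if (if v = e then (L.any (fun x => !(x == 0 || x == e))) = false
              else (L.any (fun x => !(x == 0 || x == e || x == v))) = false) then o
     else ((((PySem.List.enumerate L).filter (fun p => decide (p.2 = v))).map Prod.fst).zip
           ((((PySem.List.enumerate L).filter (fun p => decide (p.2 = v))).map Prod.fst).tail)).foldl
       (fun o ab =>
         if (ab.1 = 0 ∧ ab.2 = S - 1) ∨
            ((PySem.List.pyRange (ab.1 + 1) ab.2 1).any (fun j => !(PySem.List.pyGetD L j 0 == 0))) = true then o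
         else (PySem.List.pyRange (ab.1 + 1) ab.2 1).foldl (fun o j => pvWriteA R i v o j) o) o)
    = (if (if v = e then (L.all (fun x => x == 0 || x == e)) = true
           else (L.all (fun x => x == 0 || x == e || x == v)) = true) then o
       else ((PySem.List.enumerate L).foldl
         (fun (st : List (List Int) × Option Int × Bool) p =>
           if p.2 = v then
             (match st.2.1 with
              | some a =>
                if st.2.2 = true ∧ ¬ (a = 0 ∧ p.1 = S - 1) then
                  ((PySem.List.pyRange (a + 1) p.1 1).foldl (fun o t => pvWriteB R i v o t) st.1,
                   some p.1, true)
                else (st.1, some p.1, true)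
              | none => (st.1, some p.1, true))
           else if p.2 ≠ 0 then (st.1, st.2.1, false)
           else st) (o, (none : Option Int), false)).1) := by
  rw [pvPos_eq v L 0, pvPairfold_eq R i v S L (pvPos v L 0) o,
      pvSweep_eq R i v S L 0 o none false, pvSf_eq_pvPf]
  have he : (if v = e then (L.any (fun x => !(x == 0 || x == e))) = false
             else (L.any (fun x => !(x == 0 || x == e || x == v))) = false)
          ↔ (if v = e then (L.all (fun x => x == 0 || x == e)) = true
             else (L.all (fun x => x == 0 || x == e || x == v)) = true) := by
    by_cases hve : v = e <;> simp [hve, List.all_eq_not_any_not]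
  by_cases hel : (if v = e then (L.all (fun x => x == 0 || x == e)) = true
                  else (L.all (fun x => x == 0 || x == e || x == v)) = true)
  · rw [if_pos hel]
    by_cases hlen : (pvPos v L 0).length < 2
    · rw [if_pos hlen]
    · rw [if_neg hlen, if_pos (he.mpr hel)]
  · rw [if_neg hel]
    by_cases hlen : (pvPos v L 0).length < 2
    · rw [if_pos hlen, pvPf_short L S _ hlen]
      rfl
    · rw [if_neg hlen, if_neg (fun h => hel (he.mp h))]


theorem pvXs_eq (c : List (List Int)) :
    c.flatten.filter (fun v => decide (v ≠ 0))
      = c.flatMap (fun r => r.filter (fun v => decide (v ≠ 0))) := by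
  rw [List.filter_flatten, List.flatMap_def]

theorem pvCnt_inv : ∀ (xs : List Int) (d : PySem.Dict Int Int),
    xs.foldl (fun (s : PySem.Dict Int Int × List Int) x =>
      if s.1.contains x = false then (s.1.insert x 1, s.2 ++ [x])
      else (s.1.insert x (s.1.getD x 0 + 1), s.2)) (d, d.keys)
    = (xs.foldl (fun d x => d.insert x (d.getD x 0 + 1)) d,
       (xs.foldl (fun d x => d.insert x (d.getD x 0 + 1)) d).keys) := by
  intro xs
  induction xs with
  | nil => intro d; rfl
  | cons x xs ih =>
    intro d
    rw [List.foldl_cons, List.foldl_cons]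
    by_cases hc : d.contains x = false
    · have hstep : (if (d, d.keys).1.contains x = false
            then ((d, d.keys).1.insert x 1, (d, d.keys).2 ++ [x])
            else ((d, d.keys).1.insert x ((d, d.keys).1.getD x 0 + 1), (d, d.keys).2))
          = (d.insert x 1, (d.insert x 1).keys) := by
        show (if d.contains x = false then (d.insert x 1, d.keys ++ [x])
              else (d.insert x (d.getD x 0 + 1), d.keys)) = _
        rw [if_pos hc, PySem.Dict.keys_insert_of_not_contains d 1 hc]
      have ha : d.insert x (d.getD x 0 + 1) = d.insert x 1 := by
        rw [PySem.Dict.getD_of_not_contains d 0 hc, zero_add]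
      rw [hstep, ha, ih]
    · have hc' : d.contains x = true := by
        revert hc; cases d.contains x <;> simp
      have hstep : (if (d, d.keys).1.contains x = false
            then ((d, d.keys).1.insert x 1, (d, d.keys).2 ++ [x])
            else ((d, d.keys).1.insert x ((d, d.keys).1.getD x 0 + 1), (d, d.keys).2))
          = (d.insert x (d.getD x 0 + 1), (d.insert x (d.getD x 0 + 1)).keys) := by
        show (if d.contains x = false then (d.insert x 1, d.keys ++ [x])
              else (d.insert x (d.getD x 0 + 1), d.keys)) = _
        rw [if_neg hc, PySem.Dict.keys_insert_of_contains d _ hc']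
      rw [hstep, ih]

theorem pvC_eq (c : List (List Int)) :
    ((c.foldl (fun s r => r.foldl
        (fun (s : PySem.Dict Int Int × List Int) x =>
          if x ≠ 0 then
            if s.1.contains x = false then (s.1.insert x 1, s.2 ++ [x])
            else (s.1.insert x (s.1.getD x 0 + 1), s.2)
          else s) s) ((PySem.Dict.empty : PySem.Dict Int Int), ([] : List Int))).2.filter
      (fun v => decide (8 ≤ (c.foldl (fun s r => r.foldl
        (fun (s : PySem.Dict Int Int × List Int) x =>
          if x ≠ 0 then
            if s.1.contains x = false then (s.1.insert x 1, s.2 ++ [x])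
            else (s.1.insert x (s.1.getD x 0 + 1), s.2)
          else s) s) ((PySem.Dict.empty : PySem.Dict Int Int), ([] : List Int))).1.getD v 0)))
    = (((PySem.Dict.counter (c.flatMap (fun r => r.filter (fun v => decide (v ≠ 0))))).items.filter
        (fun p => decide (8 ≤ p.2))).map Prod.fst) := by
  have h1 : (c.foldl (fun s r => r.foldl
        (fun (s : PySem.Dict Int Int × List Int) x =>
          if x ≠ 0 then
            if s.1.contains x = false then (s.1.insert x 1, s.2 ++ [x])
            else (s.1.insert x (s.1.getD x 0 + 1), s.2)
          else s) s) ((PySem.Dict.empty : PySem.Dict Int Int), ([] : List Int)))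
      = (PySem.Dict.counter (c.flatMap (fun r => r.filter (fun v => decide (v ≠ 0)))),
         (PySem.Dict.counter (c.flatMap (fun r => r.filter (fun v => decide (v ≠ 0))))).keys) := by
    rw [← List.foldl_flatten]
    have hg : (fun (s : PySem.Dict Int Int × List Int) x =>
          if x ≠ 0 then
            if s.1.contains x = false then (s.1.insert x 1, s.2 ++ [x])
            else (s.1.insert x (s.1.getD x 0 + 1), s.2)
          else s)
        = (fun (s : PySem.Dict Int Int × List Int) x =>
          if (fun v => decide (v ≠ 0)) x = true then
            (if s.1.contains x = false then (s.1.insert x 1, s.2 ++ [x])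
             else (s.1.insert x (s.1.getD x 0 + 1), s.2))
          else s) := by
      funext s x
      by_cases h : x = 0 <;> simp [h]
    rw [hg, ← List.foldl_filter, pvXs_eq c]
    have he : (((PySem.Dict.empty : PySem.Dict Int Int), ([] : List Int))
        : PySem.Dict Int Int × List Int)
        = ((PySem.Dict.empty : PySem.Dict Int Int), (PySem.Dict.empty : PySem.Dict Int Int).keys) := rfl
    rw [he, pvCnt_inv, PySem.Dict.foldl_insert_getD_add_one_eq_counter]
  rw [h1]
  rw [PySem.Dict.keys_counter, PySem.Dict.items_counter, List.filter_map, List.map_map]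
  have hid : (Prod.fst ∘ fun k => (k, ((c.flatMap (fun r => r.filter (fun v => decide (v ≠ 0)))).count k : Int)))
      = fun k => k := by
    funext k; rfl
  rw [hid, List.map_id']
  apply List.filter_congr
  intro k _
  rw [PySem.Dict.getD_counter]
  rfl

theorem pvHeavy (c : List (List Int))
    (h : (((PySem.Dict.counter (c.flatMap (fun r => r.filter (fun v => decide (v ≠ 0))))).items.filter
        (fun p => decide (8 ≤ p.2))).map Prod.fst) ≠ []) :
    ∃ v ∈ c.flatten, v ≠ 0 ∧ 8 ≤ c.flatten.count v := by
  obtain ⟨y, hy⟩ := List.exists_mem_of_ne_nil _ h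
  obtain ⟨p, hp, hpy⟩ := List.mem_map.mp hy
  obtain ⟨hpi, hq⟩ := List.mem_filter.mp hp
  rw [PySem.Dict.items_counter] at hpi
  obtain ⟨k, hk, hkp⟩ := List.mem_map.mp hpi
  have hkxs := (PySem.Set.mem_ofList _ _).mp hk
  obtain ⟨r, hr, hkr⟩ := List.mem_flatMap.mp hkxs
  obtain ⟨hkr', hk0⟩ := List.mem_filter.mp hkr
  have hk0' : k ≠ 0 := by simpa using hk0
  refine ⟨k, List.mem_flatten.mpr ⟨r, hr, hkr'⟩, hk0', ?_⟩
  have hcnt : 8 ≤ ((c.flatMap (fun r => r.filter (fun v => decide (v ≠ 0)))).count k : Int) := by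
    rw [← hkp] at hq
    simpa using hq
  have : (c.flatMap (fun r => r.filter (fun v => decide (v ≠ 0)))).count k = c.flatten.count k := by
    rw [← pvXs_eq c, List.count_filter (by simpa using hk0')]
  rw [this] at hcnt
  exact_mod_cast hcnt

-- ===== VERDICT (by name: the statement is the Claim_ definition above) =====
theorem f_spec : Claim_equal_f := by
  intro c e _ hpre
  unfold Spec_f
  match c with
  | [] => rfl
  | r0 :: rs =>
    simp only [f, f_alt]
    rw [if_neg (List.cons_ne_nil r0 rs)]
    rw [pvC_eq (r0 :: rs)]
    by_cases hC0 : (((PySem.Dict.counter ((r0 :: rs).flatMap (fun r => r.filter (fun v => decide (v ≠ 0))))).items.filter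
        (fun p => decide (8 ≤ p.2))).map Prod.fst) = []
    · rw [if_pos hC0, hC0]
      rfl
    · rw [if_neg hC0]
      have heavy := pvHeavy _ hC0
      obtain ⟨hsq, -⟩ := hpre heavy
      have hsq' : ((((r0 :: rs).headD []).length : Nat) : Int) = (((r0 :: rs).length : Nat) : Int) := by
        rw [hsq]
      rw [hsq']
      apply congrArg some
      apply PySem.List.foldl_congr_mem
      intro o v _
      apply PySem.List.foldl_congr_mem
      intro o' R _
      cases R
      · simp only [Bool.false_eq_true, if_false]
        apply PySem.List.foldl_congr_mem
        intro o'' i hi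
        obtain ⟨hi0, hiM⟩ := PySem.List.mem_pyRange_one.mp hi
        rw [PySem.List.pyGetD_map_pyRange_of_nonneg _ _ _ _ hi0 hiM]
        exact pvLine false i v e _ _ o''
      · apply PySem.List.foldl_congr_mem
        intro o'' i _
        exact pvLine true i v e _ _ o''
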